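-- pv_equiv track=rewrite | github.com/TaneliM/DS-finalproject | FinalProject.py | combineTitles
-- ===== SOURCE A (Python) =====
-- def combineTitles (titles):
--     combinedAmount = 50 # Maximum allowed by wikipedia API is 50 for normal users
--     combined = []
--     temp = ""
--
--     for i in range(len(titles)):
--         if temp == "":
--             temp = temp + str(titles[i])
--         else:
--             temp = temp + "|" + str(titles[i])
--
--         if i % combinedAmount == combinedAmount - 1:
--             combined.append(temp)
--             temp = ""
--
--     if combined == []:
--         return titles
--
--     return combined
-- ===== SOURCE B (Python) =====
-- def combineTitles(titles):
--     n = len(titles) // 50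
--     combined = ["|".join(str(t) for t in titles[i:i + 50])
--                 for i in range(0, n * 50, 50)]
--     return combined if combined else titles
-- ===== Notes on version B (the rewrite author's own statement) =====
-- stated objective: simpler
-- what changed: Replaces the single-pass accumulator with modulo-triggered flushing by a direct chunk-wise organisation: compute the number of full 50-batches, slice each batch out and '|'.join it in a comprehension; str.join builds each batch string in one allocation instead of repeated string concatenation.
-- intended difference: On lists whose some full 50-batch starts with empty-string titles, A's 'temp == ""' emptiness test conflates 'nothing accumulated yet' with 'accumulated titles are empty' and silently drops the separators before the leading run of empty titles, while B returns the plain '|'-join with all 49 separators, which is the intended batch string. — e.g. on combineTitles(["", "a", "a", "a", "a", "a", "a", "a", "a", "a", "a", "a", "a", "a", "a", "a", "a", "a", "a", "a", "a", "a", "a", "a",…): A returns ["a|a|a|a|a|a|a|a|a|a|a|a|a|a|a|a|a|a|a|a|a|a|a|a|a|a|a|a|a|a|a|a|a|a|a|a|a|a|a|a|a|a|a|a|a|a|a|a|a"], B returns ["|a|a|a|a|a|a|a|a|a|a|a|a|a|a|a|a|a|a|a|a|a|a|a|a|a|a|a|a|a|a|a|a|a|a|a|a|a|a|a|a|a|a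|a|a|a|a|a|a|a"]
import Mathlib
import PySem

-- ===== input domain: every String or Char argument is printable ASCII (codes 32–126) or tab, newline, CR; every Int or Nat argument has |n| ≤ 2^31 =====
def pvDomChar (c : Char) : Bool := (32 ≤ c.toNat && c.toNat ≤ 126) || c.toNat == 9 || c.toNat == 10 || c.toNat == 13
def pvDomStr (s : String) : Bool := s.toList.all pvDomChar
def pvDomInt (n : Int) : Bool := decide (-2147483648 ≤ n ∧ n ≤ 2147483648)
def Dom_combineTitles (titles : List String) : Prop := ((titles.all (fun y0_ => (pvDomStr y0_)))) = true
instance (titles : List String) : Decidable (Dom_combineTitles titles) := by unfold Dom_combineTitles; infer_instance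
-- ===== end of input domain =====

-- B replaces A's accumulator-with-modulo-flush loop by chunk-wise slice-and-join (simpler decomposition);
-- on batches starting with empty-string titles A drops leading separators, B returns the intended plain join (see D_ below).


-- ===== PORT A =====
-- the for-loop over range(len(titles)) with state (combined, temp); i is the loop index
def combineTitlesLoop : List String → Nat → String → List String → List String × String
  | [], _i, temp, combined => (combined, temp)
  | t :: ts, i, temp, combined =>
    let temp' := if temp == "" then temp ++ t else temp ++ "|" ++ t
    if i % 50 == 49 then combineTitlesLoop ts (i + 1) "" (combined ++ [temp'])
    else combineTitlesLoop ts (i + 1) temp' combined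

def combineTitles (titles : List String) : List String :=
  let r := combineTitlesLoop titles 0 "" []
  if r.1 = [] then titles else r.1

-- ===== PORT B =====
def combineTitles_alt (titles : List String) : List String :=
  let n := (titles.length : Int) / 50
  let combined := (PySem.List.pyRange 0 (n * 50) 50).map
    (fun i => PySem.Str.join "|" (PySem.List.slice titles (some i) (some (i + 50))))
  if combined = [] then titles else combined

-- ===== PRECONDITION & SPEC =====
-- On lists where some full 50-batch starts with empty-string titles, A's `temp == ""` test conflates
-- "nothing accumulated yet" with "accumulated titles are empty" and silently drops the separators before
-- the leading run of empty titles; B returns the plain '|'-join with all 49 separators, the intended batch.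
def D_combineTitles (titles : List String) : Prop :=
  ∃ k ∈ List.range (titles.length / 50), titles.getD (50 * k) "" = ""
instance (titles : List String) : Decidable (D_combineTitles titles) := by
  unfold D_combineTitles; infer_instance

def Spec_combineTitles (titles : List String) (out : List String) : Prop :=
  ¬ D_combineTitles titles → out = combineTitles_alt titles
instance (titles : List String) (out : List String) : Decidable (Spec_combineTitles titles out) := by
  unfold Spec_combineTitles; infer_instance

def pvDiffWitness_combineTitles : List String :=
  ["", "a", "a", "a", "a", "a", "a", "a", "a", "a", "a", "a", "a", "a", "a", "a", "a", "a", "a", "a", "a", "a", "a", "a", "a", "a", "a", "a", "a", "a", "a", "a", "a", "a", "a", "a", "a", "a", "a", "a", "a", "a", "a", "a", "a", "a", "a", "a", "a", "a"]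
def pvDiffWitnessOut_combineTitles : (List String) × (List String) :=
  (["a|a|a|a|a|a|a|a|a|a|a|a|a|a|a|a|a|a|a|a|a|a|a|a|a|a|a|a|a|a|a|a|a|a|a|a|a|a|a|a|a|a|a|a|a|a|a|a|a"],
   ["|a|a|a|a|a|a|a|a|a|a|a|a|a|a|a|a|a|a|a|a|a|a|a|a|a|a|a|a|a|a|a|a|a|a|a|a|a|a|a|a|a|a|a|a|a|a|a|a|a"])

-- ===== CLAIM (what is proved, stated in full; the proofs are below) =====
def Claim_unchanged_combineTitles : Prop := ∀ (titles : List String), Dom_combineTitles titles → Spec_combineTitles titles (combineTitles titles)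
def Claim_changed_combineTitles : Prop := Dom_combineTitles (pvDiffWitness_combineTitles) ∧ D_combineTitles (pvDiffWitness_combineTitles) ∧ combineTitles (pvDiffWitness_combineTitles) = pvDiffWitnessOut_combineTitles.1 ∧ combineTitles_alt (pvDiffWitness_combineTitles) = pvDiffWitnessOut_combineTitles.2 ∧ pvDiffWitnessOut_combineTitles.1 ≠ pvDiffWitnessOut_combineTitles.2
def Claim_exact_combineTitles : Prop := ∀ (titles : List String), Dom_combineTitles titles → D_combineTitles titles → combineTitles titles ≠ combineTitles_alt titles

-- ===== LEMMAS AND PROOFS =====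

-- A's per-element accumulation step
def jstep (t c : String) : String := if t == "" then t ++ c else t ++ "|" ++ c

-- the characters of a '|'-separated tail: one '|' before every element
def pipeCat (cs : List String) : List Char := (cs.map (fun c => '|' :: c.toList)).flatten

lemma loopA_cons (t : String) (ts : List String) (i : Nat) (temp : String) (acc : List String) :
    combineTitlesLoop (t :: ts) i temp acc =
      if i % 50 == 49 then combineTitlesLoop ts (i + 1) "" (acc ++ [jstep temp t])
      else combineTitlesLoop ts (i + 1) (jstep temp t) acc := rfl

lemma loopA_partial : ∀ (cs : List String) (i : Nat) (temp : String) (acc : List String),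
    i % 50 + cs.length < 50 → combineTitlesLoop cs i temp acc = (acc, cs.foldl jstep temp) := by
  intro cs
  induction cs with
  | nil => intro i temp acc _; rfl
  | cons c cs ih =>
    intro i temp acc h
    simp only [List.length_cons] at h
    rw [loopA_cons]
    have h49 : (i % 50 == 49) = false := by
      simp only [beq_eq_false_iff_ne]; omega
    rw [h49]
    simp only [Bool.false_eq_true, if_false]
    have : (i + 1) % 50 + cs.length < 50 := by omega
    rw [ih _ _ _ this]
    rfl

lemma loopA_fill : ∀ (cs rest : List String) (i : Nat) (temp : String) (acc : List String),
    i % 50 + cs.length = 50 →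
    combineTitlesLoop (cs ++ rest) i temp acc =
      combineTitlesLoop rest (i + cs.length) "" (acc ++ [cs.foldl jstep temp]) := by
  intro cs
  induction cs with
  | nil => intro rest i temp acc h; simp only [List.length_nil, add_zero] at h; omega
  | cons c cs ih =>
    intro rest i temp acc h
    simp only [List.length_cons] at h
    by_cases hcs : cs = []
    · subst hcs
      simp only [List.length_nil] at h
      have h49 : (i % 50 == 49) = true := by simp only [beq_iff_eq]; omega
      simp only [List.cons_append, List.nil_append, loopA_cons, h49, if_true]
      simp only [List.length_cons, List.length_nil, List.foldl_cons, List.foldl_nil]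
    · have hlen : 0 < cs.length := List.length_pos_iff.mpr hcs
      have h49 : (i % 50 == 49) = false := by simp only [beq_eq_false_iff_ne]; omega
      rw [List.cons_append, loopA_cons, h49]
      simp only [Bool.false_eq_true, if_false]
      have hm : (i + 1) % 50 + cs.length = 50 := by omega
      rw [ih _ _ _ _ hm]
      simp only [List.length_cons, List.foldl_cons]
      congr 1
      omega

lemma loopA_main : ∀ (m : Nat) (ts : List String) (i : Nat) (acc : List String),
    ts.length ≤ m → i % 50 = 0 →
    (combineTitlesLoop ts i "" acc).1 =
      acc ++ (List.range (ts.length / 50)).map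
        (fun k => ((ts.drop (50 * k)).take 50).foldl jstep "") := by
  intro m
  induction m with
  | zero =>
    intro ts i acc hle _
    have : ts = [] := List.eq_nil_of_length_eq_zero (by omega)
    subst this
    simp [combineTitlesLoop]
  | succ m ih =>
    intro ts i acc hle hi
    by_cases hlt : ts.length < 50
    · rw [loopA_partial ts i "" acc (by omega)]
      have : ts.length / 50 = 0 := Nat.div_eq_of_lt hlt
      simp [this]
    · rw [not_lt] at hlt
      have htake : (ts.take 50).length = 50 := by
        rw [List.length_take]; omega
      calc (combineTitlesLoop ts i "" acc).1
          = (combineTitlesLoop (ts.take 50 ++ ts.drop 50) i "" acc).1 := by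
            rw [List.take_append_drop]
        _ = (combineTitlesLoop (ts.drop 50) (i + (ts.take 50).length) ""
              (acc ++ [(ts.take 50).foldl jstep ""])).1 := by
            rw [loopA_fill _ _ _ _ _ (by rw [htake]; omega)]
        _ = (acc ++ [(ts.take 50).foldl jstep ""]) ++
              (List.range ((ts.drop 50).length / 50)).map
                (fun k => (((ts.drop 50).drop (50 * k)).take 50).foldl jstep "") := by
            apply ih
            · rw [List.length_drop]; omega
            · rw [htake]; omega
        _ = acc ++ (List.range (ts.length / 50)).map
              (fun k => ((ts.drop (50 * k)).take 50).foldl jstep "") := by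
            have hq : ts.length / 50 = (ts.drop 50).length / 50 + 1 := by
              rw [List.length_drop]; omega
            rw [hq, List.range_succ_eq_map, List.map_cons, List.map_map]
            simp only [Nat.mul_zero, List.drop_zero, List.append_assoc, List.singleton_append]
            congr 2
            apply List.map_congr_left
            intro k _
            simp only [Function.comp_apply, List.drop_drop]
            congr 3
            omega

-- ---- B-side normalisation ----

lemma pyRange_chunks (n : Nat) :
    PySem.List.pyRange 0 ((n : Int) * 50) 50 = (List.range n).map (fun k => ((50 * k : Nat) : Int)) := by
  unfold PySem.List.pyRange
  by_cases hn : n = 0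
  · subst hn; simp
  · have hp : (0 : Int) < (n : Int) * 50 := by
      have : 0 < n := Nat.pos_of_ne_zero hn
      omega
    rw [if_neg (by norm_num), if_pos (by norm_num), if_pos hp]
    have hcount : (((n : Int) * 50 - 0 + 50 - 1) / 50).toNat = n := by omega
    rw [hcount]
    apply List.map_congr_left
    intro k _
    push_cast
    ring

lemma slice_chunk (ts : List String) (k : Nat) :
    PySem.List.slice ts (some ((50 * k : Nat) : Int)) (some (((50 * k : Nat) : Int) + 50)) =
      (ts.drop (50 * k)).take 50 := by
  have h50 : ((50 : Nat) : Int) = (50 : Int) := by norm_num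
  have := PySem.List.slice_natCast_add (xs := ts) (j := 50 * k) (n := 50)
  rw [h50] at this
  exact this

lemma alt_eq (ts : List String) :
    combineTitles_alt ts =
      (if ((List.range (ts.length / 50)).map
            (fun k => PySem.Str.join "|" ((ts.drop (50 * k)).take 50))) = [] then ts
       else (List.range (ts.length / 50)).map
            (fun k => PySem.Str.join "|" ((ts.drop (50 * k)).take 50))) := by
  have hdiv : ((ts.length : Int) / 50) = ((ts.length / 50 : Nat) : Int) := by omega
  simp only [combineTitles_alt, hdiv, pyRange_chunks, List.map_map]
  have hmap : (List.range (ts.length / 50)).map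
        ((fun i => PySem.Str.join "|" (PySem.List.slice ts (some i) (some (i + 50)))) ∘
          fun k => ((50 * k : Nat) : Int)) =
      (List.range (ts.length / 50)).map
        (fun k => PySem.Str.join "|" ((ts.drop (50 * k)).take 50)) :=
    List.map_congr_left (fun k _ => by simp only [Function.comp_apply, slice_chunk])
  rw [hmap]

-- ---- string-level facts ----

lemma str_toList_ne (c : String) (h : c ≠ "") : c.toList ≠ [] := by
  intro hc
  apply h
  rw [String.ext_iff, hc]
  rfl

lemma jstep_toList_ne (temp c : String) (h : temp.toList ≠ []) :
    (jstep temp c).toList = temp.toList ++ '|' :: c.toList := by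
  unfold jstep
  rw [if_neg]
  · simp [String.toList_append]
  · simp only [beq_iff_eq]
    intro he
    apply h
    rw [he]; rfl

lemma fold_ne : ∀ (cs : List String) (temp : String), temp.toList ≠ [] →
    (cs.foldl jstep temp).toList = temp.toList ++ pipeCat cs := by
  intro cs
  induction cs with
  | nil => intro temp _; simp [pipeCat]
  | cons c cs ih =>
    intro temp h
    have hne : (jstep temp c).toList ≠ [] := by
      rw [jstep_toList_ne temp c h]
      simp [h]
    rw [List.foldl_cons, ih _ hne, jstep_toList_ne temp c h]
    simp [pipeCat]

lemma fold_head (c : String) (cs : List String) (h : c ≠ "") :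
    ((c :: cs).foldl jstep "").toList = c.toList ++ pipeCat cs := by
  have h0 : jstep "" c = c := by simp [jstep]
  rw [List.foldl_cons, h0, fold_ne cs c (str_toList_ne c h)]

lemma join_toList : ∀ (c : String) (cs : List String),
    (PySem.Str.join "|" (c :: cs)).toList = c.toList ++ pipeCat cs := by
  have key : ∀ (l : List (List Char)) (x : List Char),
      List.intercalate ['|'] (x :: l) = x ++ (l.map (fun y => '|' :: y)).flatten := by
    intro l
    induction l with
    | nil => intro x; simp [List.intercalate]
    | cons y l ih =>
      intro x
      show (List.intersperse ['|'] (x :: y :: l)).flatten = _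
      have hint : List.intersperse ['|'] (x :: y :: l) = x :: ['|'] :: List.intersperse ['|'] (y :: l) := by
        simp [List.intersperse]
      rw [hint]
      simp only [List.flatten_cons]
      have := ih y
      simp only [List.intercalate] at this
      rw [this]
      simp
  intro c cs
  rw [PySem.Str.toList_join]
  show PySem.Chars.join "|".toList (c.toList :: cs.map String.toList) = _
  have hsep : "|".toList = ['|'] := rfl
  rw [hsep]
  show List.intercalate ['|'] (c.toList :: cs.map String.toList) = _
  rw [key]
  simp [pipeCat, List.map_map, Function.comp_def]

lemma chunk_eq (c : String) (cs : List String) (h : c ≠ "") :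
    (c :: cs).foldl jstep "" = PySem.Str.join "|" (c :: cs) := by
  rw [String.ext_iff, fold_head c cs h, join_toList]

lemma fold_empty_head (cs : List String) :
    (("" :: cs).foldl jstep "") = cs.foldl jstep "" := by
  have h0 : jstep "" "" = "" := by simp [jstep]
  rw [List.foldl_cons, h0]

lemma join_le_pipe : ∀ (cs : List String),
    (PySem.Str.join "|" cs).toList.length ≤ (pipeCat cs).length := by
  intro cs
  cases cs with
  | nil => simp [PySem.Str.join, PySem.Chars.join, List.intercalate, pipeCat]
  | cons c cs =>
    rw [join_toList]
    simp only [pipeCat, List.map_cons, List.flatten_cons, List.length_append, List.length_cons]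
    omega

lemma fold_le : ∀ (cs : List String),
    ((cs.foldl jstep "").toList).length ≤ (PySem.Str.join "|" cs).toList.length := by
  intro cs
  induction cs with
  | nil => simp
  | cons c cs ih =>
    by_cases h : c = ""
    · subst h
      rw [fold_empty_head]
      calc ((cs.foldl jstep "").toList).length
          ≤ (PySem.Str.join "|" cs).toList.length := ih
        _ ≤ (pipeCat cs).length := join_le_pipe cs
        _ ≤ (PySem.Str.join "|" ("" :: cs)).toList.length := by
            rw [join_toList]; simp
    · rw [fold_head c cs h, join_toList]

-- chunk decomposition: a full batch, seen head-first
lemma chunk_cons (ts : List String) (k : Nat) (hk : 50 * (k + 1) ≤ ts.length) :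
    ∃ (h : 50 * k < ts.length),
      (ts.drop (50 * k)).take 50 = ts[50 * k] :: ((ts.drop (50 * k + 1)).take 49) := by
  have h : 50 * k < ts.length := by omega
  refine ⟨h, ?_⟩
  rw [List.drop_eq_getElem_cons h]
  rfl

lemma range_bound {k n len : Nat} (hk : k ∈ List.range n) (hn : n = len / 50) :
    50 * (k + 1) ≤ len := by
  rw [List.mem_range] at hk
  subst hn
  have := Nat.lt_of_lt_of_le hk (Nat.le_refl _)
  have h1 : k + 1 ≤ len / 50 := hk
  have h2 : (k + 1) * 50 ≤ len := (Nat.le_div_iff_mul_le (by omega)).mp h1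
  omega

-- ===== VERDICT (by name: the statement is the Claim_ definition above) =====
theorem combineTitles_spec : Claim_unchanged_combineTitles := by
  intro ts _dom hD
  show combineTitles ts = combineTitles_alt ts
  have hA : (combineTitlesLoop ts 0 "" []).1 =
      (List.range (ts.length / 50)).map (fun k => ((ts.drop (50 * k)).take 50).foldl jstep "") := by
    have := loopA_main ts.length ts 0 [] (le_refl _) (by omega)
    simpa using this
  have hmaps : (List.range (ts.length / 50)).map
        (fun k => ((ts.drop (50 * k)).take 50).foldl jstep "") =
      (List.range (ts.length / 50)).map
        (fun k => PySem.Str.join "|" ((ts.drop (50 * k)).take 50)) := by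
    apply List.map_congr_left
    intro k hk
    have hb := range_bound hk rfl
    obtain ⟨hlt, hchunk⟩ := chunk_cons ts k hb
    have hne : ts[50 * k] ≠ "" := by
      intro he
      apply hD
      exact ⟨k, hk, by rw [List.getD_eq_getElem ts "" hlt]; exact he⟩
    rw [hchunk, chunk_eq _ _ hne]
  rw [alt_eq ts]
  show (if (combineTitlesLoop ts 0 "" []).1 = [] then ts else (combineTitlesLoop ts 0 "" []).1) = _
  rw [hA, hmaps]

set_option maxRecDepth 100000 in
theorem combineTitles_changed : Claim_changed_combineTitles := by
  unfold Claim_changed_combineTitles; decide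

theorem combineTitles_tight : Claim_exact_combineTitles := by
  intro ts _dom hDd heq
  obtain ⟨k, hk, hget⟩ := hDd
  have hb := range_bound hk rfl
  obtain ⟨hlt, hchunk⟩ := chunk_cons ts k hb
  have hhead : ts[50 * k] = "" := by
    rw [List.getD_eq_getElem ts "" hlt] at hget; exact hget
  -- both programs return their (nonempty) batch lists
  have hA : (combineTitlesLoop ts 0 "" []).1 =
      (List.range (ts.length / 50)).map (fun k => ((ts.drop (50 * k)).take 50).foldl jstep "") := by
    have := loopA_main ts.length ts 0 [] (le_refl _) (by omega)
    simpa using this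
  have hnil : (List.range (ts.length / 50)) ≠ [] := by
    intro h
    rw [h] at hk
    exact absurd hk (List.not_mem_nil)
  have heqA : combineTitles ts =
      (List.range (ts.length / 50)).map (fun k => ((ts.drop (50 * k)).take 50).foldl jstep "") := by
    show (if (combineTitlesLoop ts 0 "" []).1 = [] then ts else (combineTitlesLoop ts 0 "" []).1) = _
    rw [hA, if_neg (by simp [hnil])]
  have heqB : combineTitles_alt ts =
      (List.range (ts.length / 50)).map (fun k => PySem.Str.join "|" ((ts.drop (50 * k)).take 50)) := by
    rw [alt_eq ts, if_neg (by simp [hnil])]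
  rw [heqA, heqB] at heq
  rw [List.map_eq_map_iff] at heq
  have hkEq := heq k hk
  -- the k-th batch strings have different lengths
  rw [hchunk, hhead] at hkEq
  set rest := (ts.drop (50 * k + 1)).take 49 with hrest
  have hrestne : rest ≠ [] := by
    have : rest.length = 49 := by
      rw [hrest, List.length_take, List.length_drop]
      omega
    intro h; rw [h] at this; simp at this
  obtain ⟨r, rr, hr⟩ := List.exists_cons_of_ne_nil hrestne
  have hlens : ((("" :: rest).foldl jstep "").toList).length <
      ((PySem.Str.join "|" ("" :: rest)).toList).length := by
    rw [fold_empty_head, join_toList]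
    have h1 : ((rest.foldl jstep "").toList).length ≤ (PySem.Str.join "|" rest).toList.length :=
      fold_le rest
    have h2 : (PySem.Str.join "|" rest).toList.length < (pipeCat rest).length := by
      rw [hr, join_toList]
      simp only [pipeCat, List.map_cons, List.flatten_cons, List.length_append, List.length_cons]
      omega
    have h3 : (("" : String).toList ++ pipeCat rest).length = (pipeCat rest).length := by
      simp
    omega
  rw [hkEq] at hlens
  exact lt_irrefl _ hlens
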